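-- pv_equiv track=rewrite | github.com/Yujie-Du/molo | operators.py | _ifsamesize
-- ===== SOURCE A (Python) =====
-- def _ifsamesize(sizes):
--     if len(sizes)<=1:
--         return True
--     s=sizes[0]
--     for s2 in sizes[1:]:
--         if s!=s2:
--             return False
--     return True
-- ===== SOURCE B (Python) =====
-- def _ifsamesize(sizes):
--     return len(set(sizes)) <= 1
-- ===== Notes on version B (the rewrite author's own statement) =====
-- stated objective: idiomatic
-- what changed: Replaces the explicit compare-to-first loop with early exit by deduplicating into a set and testing that at most one distinct value remains.
import Mathlib
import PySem

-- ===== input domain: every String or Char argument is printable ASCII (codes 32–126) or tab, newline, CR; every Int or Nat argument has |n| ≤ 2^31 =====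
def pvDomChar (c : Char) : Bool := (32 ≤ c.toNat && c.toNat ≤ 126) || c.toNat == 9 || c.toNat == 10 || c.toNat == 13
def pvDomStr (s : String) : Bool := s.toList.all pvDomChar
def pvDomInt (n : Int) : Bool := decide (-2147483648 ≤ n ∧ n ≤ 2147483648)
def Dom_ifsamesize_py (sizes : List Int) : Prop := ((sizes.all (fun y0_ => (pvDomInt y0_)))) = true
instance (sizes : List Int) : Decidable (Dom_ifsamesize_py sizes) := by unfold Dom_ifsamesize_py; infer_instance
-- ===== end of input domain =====

-- B replaces A's compare-to-first loop by deduplicating into a set and testing len(set) <= 1 (idiomatic; same cost).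

-- ===== PORT A =====
-- the 'for s2 in sizes[1:]' loop: if s != s2 return False, else continue; fall through to True
def ifsamesizeLoop (s : Int) : List Int → Bool
  | [] => true
  | s2 :: rest => if s ≠ s2 then false else ifsamesizeLoop s rest

def ifsamesize_py (sizes : List Int) : Bool :=
  if sizes.length ≤ 1 then true
  else
    match sizes with
    | [] => true  -- unreachable: length > 1
    | s :: _ => ifsamesizeLoop s (PySem.List.slice sizes (some 1) none)

-- ===== PORT B =====
def ifsamesize_py_alt (sizes : List Int) : Bool :=
  decide (PySem.Set.len (PySem.Set.ofList sizes) ≤ 1)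

-- ===== PRECONDITION & SPEC =====
def Spec_ifsamesize_py (sizes : List Int) (out : Bool) : Prop := out = ifsamesize_py_alt sizes
instance (sizes : List Int) (out : Bool) : Decidable (Spec_ifsamesize_py sizes out) := by unfold Spec_ifsamesize_py; infer_instance

-- ===== CLAIM (what is proved, stated in full; the proofs are below) =====
def Claim_equal_ifsamesize_py : Prop := ∀ (sizes : List Int), Dom_ifsamesize_py sizes → Spec_ifsamesize_py sizes (ifsamesize_py sizes)

-- ===== LEMMAS AND PROOFS =====

theorem loop_eq_all (s : Int) (rest : List Int) :
    ifsamesizeLoop s rest = rest.all (fun x => x == s) := by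
  induction rest with
  | nil => rfl
  | cons x xs ih =>
    by_cases h : s = x
    · subst h; simp [ifsamesizeLoop, ih]
    · simp [ifsamesizeLoop, h, Ne.symm h]

theorem foldl_add_const (s : Int) (rest : List Int)
    (h : ∀ x ∈ rest, x = s) : rest.foldl PySem.Set.add [s] = [s] := by
  induction rest with
  | nil => rfl
  | cons x xs ih =>
    have hx : x = s := h x (by simp)
    simp only [List.foldl_cons, hx, PySem.Set.add_of_mem (by simp : s ∈ [s])]
    exact ih (fun y hy => h y (by simp [hy]))

theorem le_length_foldl_add (rest : List Int) (acc : List Int) :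
    acc.length ≤ (rest.foldl PySem.Set.add acc).length := by
  induction rest generalizing acc with
  | nil => simp
  | cons x xs ih =>
    refine le_trans ?_ (ih (PySem.Set.add acc x))
    simp only [PySem.Set.add]
    split <;> simp

theorem foldl_add_two_le (s : Int) (rest : List Int)
    (h : ∃ x ∈ rest, x ≠ s) : 2 ≤ (rest.foldl PySem.Set.add [s]).length := by
  induction rest with
  | nil => simp at h
  | cons x xs ih =>
    by_cases hx : x = s
    · subst hx
      simp only [List.foldl_cons, PySem.Set.add_of_mem (by simp : x ∈ [x])]
      rcases h with ⟨y, hy, hys⟩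
      rcases List.mem_cons.mp hy with rfl | hy'
      · exact absurd rfl hys
      · exact ih ⟨y, hy', hys⟩
    · have hne : x ∉ [s] := by simpa using hx
      rw [List.foldl_cons, PySem.Set.add_of_not_mem hne]
      simpa using le_length_foldl_add xs ([s] ++ [x])

theorem main_eq (sizes : List Int) : ifsamesize_py sizes = ifsamesize_py_alt sizes := by
  unfold ifsamesize_py ifsamesize_py_alt
  match sizes with
  | [] => simp [PySem.Set.len, PySem.Set.ofList_eq_foldl]
  | [s] =>
    simp [PySem.Set.len, PySem.Set.ofList_eq_foldl, PySem.Set.add]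
  | s :: x :: rest =>
    have hlen : ¬ (s :: x :: rest).length ≤ 1 := by simp
    simp only [hlen, if_false, PySem.List.slice_from_one, List.tail_cons, loop_eq_all]
    have hof : PySem.Set.ofList (s :: x :: rest) = (x :: rest).foldl PySem.Set.add [s] := by
      rw [PySem.Set.ofList_eq_foldl]; rfl
    by_cases hall : ∀ y ∈ x :: rest, y = s
    · have h1 : (x :: rest).all (fun y => y == s) = true := by
        simp only [List.all_eq_true, beq_iff_eq]; exact hall
      rw [h1, hof, foldl_add_const s _ hall]
      simp [PySem.Set.len]
    · push_neg at hall
      have h1 : (x :: rest).all (fun y => y == s) = false := by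
        rcases hall with ⟨y, hy, hys⟩
        simp only [List.all_eq_false]; exact ⟨y, hy, by simp [hys]⟩
      have h2 := foldl_add_two_le s (x :: rest) (by rcases hall with ⟨y, hy, hys⟩; exact ⟨y, hy, hys⟩)
      rw [h1, hof]
      have h3 : ¬ (PySem.Set.len ((x :: rest).foldl PySem.Set.add [s]) ≤ 1) := by
        simp only [PySem.Set.len]
        omega
      simp only [decide_eq_false h3]

-- ===== VERDICT (by name: the statement is the Claim_ definition above) =====
theorem ifsamesize_py_spec : Claim_equal_ifsamesize_py := by
  intro sizes _
  unfold Spec_ifsamesize_py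
  exact main_eq sizes
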